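-- pv_equiv track=rewrite | github.com/cancan101/graphql-db-api | graphqldb/adapter.py | get_gql_fields
-- ===== SOURCE A (Python) =====
-- from collections import defaultdict
-- from typing import (
--     Any,
--     Collection,
--     Dict,
--     Iterator,
--     List,
--     Optional,
--     Sequence,
--     Tuple,
--     TypedDict,
--     Union,
--     cast,
-- )
--
-- def get_gql_fields(column_names: Sequence[str]) -> str:
--     # TODO(cancan101): actually nest this
--     def get_field_str(fields: List[str], root: Optional[str] = None) -> str:
--         ret = " ".join(fields)
--         if root is not None:
--             ret = f"{root} {{{ret}}}"
--         return ret
--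
--     mappings: Dict[Optional[str], List[str]] = defaultdict(list)
--     for field in [x.split("__", 1) for x in column_names]:
--         if len(field) == 1:
--             mappings[None].append(field[-1])
--         else:
--             mappings[field[0]].append(field[-1])
--
--     fields_str = " ".join(
--         get_field_str(fields, root=root) for root, fields in mappings.items()
--     )
--     return fields_str
-- ===== SOURCE B (Python) =====
-- def get_gql_fields(column_names):
--     splits = [x.split("__", 1) for x in column_names]
--     roots = [None if len(f) == 1 else f[0] for f in splits]
--     out = []
--     for root in dict.fromkeys(roots):
--         body = " ".join(f[-1] for f, r in zip(splits, roots) if r == root)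
--         out.append(body if root is None else f"{root} {{{body}}}")
--     return " ".join(out)
-- ===== Notes on version B (the rewrite author's own statement) =====
-- stated objective: alternative
-- what changed: Replaces A's single-pass defaultdict grouping with distinct-root extraction via dict.fromkeys followed by one filtering pass over the columns per distinct root (wrapping each group inline), instead of maintaining a key->list index.
import Mathlib
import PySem

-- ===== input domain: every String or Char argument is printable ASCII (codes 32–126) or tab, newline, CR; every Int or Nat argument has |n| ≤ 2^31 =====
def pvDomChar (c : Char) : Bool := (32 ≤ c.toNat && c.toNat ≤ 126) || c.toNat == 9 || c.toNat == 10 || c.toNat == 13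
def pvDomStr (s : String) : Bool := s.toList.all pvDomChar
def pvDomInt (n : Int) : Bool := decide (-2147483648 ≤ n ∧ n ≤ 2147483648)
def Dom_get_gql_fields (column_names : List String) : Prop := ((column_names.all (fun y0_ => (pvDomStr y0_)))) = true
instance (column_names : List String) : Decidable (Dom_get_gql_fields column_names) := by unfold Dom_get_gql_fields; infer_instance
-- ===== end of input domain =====

-- B replaces A's single-pass defaultdict grouping by distinct-root extraction (dict.fromkeys)
-- plus one filtering pass per distinct root ('alternative': same result, different decomposition).

-- ===== PORT A =====
-- get_field_str(fields, root)
def pvGetFieldStrA (fields : List String) (root : Option String) : String :=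
  let ret := PySem.Str.join " " fields
  match root with
  | none => ret
  | some r => r ++ " {" ++ ret ++ "}"

def get_gql_fields (column_names : List String) : String :=
  -- [x.split("__", 1) for x in column_names]  ("__" ≠ "" so splitMax? is always some)
  let fields := column_names.map (fun x => (PySem.Str.splitMax? x "__" 1).getD [x])
  -- for field in …: mappings[None or field[0]].append(field[-1])   (defaultdict(list))
  let mappings := fields.foldl (fun d field =>
    if field.length == 1 then
      d.modify none [] (fun l => l ++ [PySem.List.pyGetD field (-1) ""])
    else
      d.modify (some (PySem.List.pyGetD field 0 "")) [] (fun l => l ++ [PySem.List.pyGetD field (-1) ""]))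
    PySem.Dict.empty
  PySem.Str.join " " (mappings.items.map (fun p => pvGetFieldStrA p.2 p.1))

-- ===== PORT B =====
def get_gql_fields_alt (column_names : List String) : String :=
  let splits := column_names.map (fun x => (PySem.Str.splitMax? x "__" 1).getD [x])
  let roots := splits.map (fun f => if f.length == 1 then (none : Option String) else some (PySem.List.pyGetD f 0 ""))
  let out := (PySem.List.dedup roots).map (fun root =>
    let body := PySem.Str.join " "
      (((splits.zip roots).filter (fun p => p.2 == root)).map (fun p => PySem.List.pyGetD p.1 (-1) ""))
    match root with
    | none => body
    | some r => r ++ " {" ++ body ++ "}")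
  PySem.Str.join " " out

-- ===== PRECONDITION & SPEC =====
def Spec_get_gql_fields (column_names : List String) (out : String) : Prop := out = get_gql_fields_alt column_names
instance (column_names : List String) (out : String) : Decidable (Spec_get_gql_fields column_names out) := by unfold Spec_get_gql_fields; infer_instance

-- ===== CLAIM (what is proved, stated in full; the proofs are below) =====
def Claim_equal_get_gql_fields : Prop := ∀ (column_names : List String), Dom_get_gql_fields column_names → Spec_get_gql_fields column_names (get_gql_fields column_names)

-- ===== LEMMAS AND PROOFS =====

-- the per-field key and value A's loop uses
def pvKeyF (f : List String) : Option String :=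
  if f.length == 1 then none else some (PySem.List.pyGetD f 0 "")
def pvValF (f : List String) : String := PySem.List.pyGetD f (-1) ""

-- A's loop body in key(·)/value(·) form
lemma pvStepA_eq : (fun (d : PySem.Dict (Option String) (List String)) field =>
    if field.length == 1 then
      d.modify none [] (fun l => l ++ [PySem.List.pyGetD field (-1) ""])
    else
      d.modify (some (PySem.List.pyGetD field 0 "")) [] (fun l => l ++ [PySem.List.pyGetD field (-1) ""]))
    = (fun d field => d.modify (pvKeyF field) [] (fun l => l ++ [pvValF field])) := by
  funext d field
  simp only [pvKeyF, pvValF]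
  split <;> rfl

-- ===== VERDICT (by name: the statement is the Claim_ definition above) =====
-- the (key, value) pair each field contributes
def pvPairF (f : List String) : Option String × String := (pvKeyF f, pvValF f)

-- A's dict, written as a fold over the (key, value) pairs
lemma pvDictA_eq (fields : List (List String)) :
    fields.foldl (fun d field => d.modify (pvKeyF field) [] (fun l => l ++ [pvValF field]))
      PySem.Dict.empty
    = (fields.map pvPairF).foldl (fun d p => d.modify p.1 [] (fun l => l ++ [p.2]))
        PySem.Dict.empty := by
  rw [List.foldl_map]; rfl

lemma pvZipMapSelf {α β : Type} (l : List α) (g : α → β) :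
    l.zip (l.map g) = l.map (fun x => (x, g x)) := by
  induction l with
  | nil => rfl
  | cons a t ih => simp [ih]

theorem get_gql_fields_spec : Claim_equal_get_gql_fields := by
  intro column_names _
  unfold Spec_get_gql_fields get_gql_fields get_gql_fields_alt
  simp only [pvStepA_eq]
  set fields := column_names.map (fun x => (PySem.Str.splitMax? x "__" 1).getD [x]) with hf
  have hroots : fields.map (fun f => if f.length == 1 then (none : Option String)
      else some (PySem.List.pyGetD f 0 "")) = fields.map pvKeyF := rfl
  rw [hroots]
  set d := fields.foldl (fun d field => d.modify (pvKeyF field) [] (fun l => l ++ [pvValF field]))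
      PySem.Dict.empty with hd
  have hnd : d.keys.Nodup := by
    rw [hd]
    exact PySem.Dict.nodup_keys_foldl_modify_key _ _ _ _ _ (by simp [PySem.Dict.keys_empty])
  have hkeys : d.keys = PySem.List.dedup (fields.map pvKeyF) := by
    rw [hd, PySem.Dict.keys_foldl_modify_key, PySem.Dict.keys_empty,
      PySem.Set.update_nil_left, PySem.List.dedup_eq_ofList]
  have hget : ∀ k, d.getD k [] = (fields.filter (fun f => pvKeyF f == k)).map pvValF := by
    intro k
    rw [hd, pvDictA_eq, PySem.Dict.getD_foldl_modify_append, PySem.Dict.getD_empty,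
      List.filter_map, List.map_map]
    simp [Function.comp_def, pvPairF]
  rw [PySem.Dict.items_eq_map_keys d hnd [], List.map_map, hkeys]
  congr 1
  apply List.map_congr_left
  intro k _
  rw [Function.comp_apply, hget k]
  simp only [pvZipMapSelf, List.filter_map, List.map_map]
  cases k <;> rfl
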